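-- pv_equiv track=rewrite | github.com/RodrigoRiveraRico/WebPruebaShowVariables | app/conexion_postgresql/postgresql.py | resolution_from_psql
-- ===== SOURCE A (Python) =====
-- def resolution_from_psql(bases, fuente_de_datos_metadatos):
--     '''
--     Función que se emplea con la configuración para conectar bases de datos en postgresql.
--
--     Return: Diccionario.
--     '''
--     dic = {}    # Diccionario a construir.
--     for db in bases:    # Para cada base de las seleccionadas
--         res_dict = fuente_de_datos_metadatos[db]['resolution']  # Se asigna el diccionario de resolucion de cada base
--         for key in res_dict.keys(): # Cada key es una resolución
--             if key not in dic:  # Si la resolucion no está en el diccionario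
--                 dic.update({key:[]})    # Agregamos la resolución faltante cuyos valores será una lista de bases de datos
--             dic[key].append(db) # Añadimos la base de datos a la resolución
--     return dic
-- ===== SOURCE B (Python) =====
-- def resolution_from_psql(bases, fuente_de_datos_metadatos):
--     '''
--     Función que se emplea con la configuración para conectar bases de datos en postgresql.
--
--     Return: Diccionario.
--     '''
--     # First collect the distinct resolution keys in first-seen order,
--     # then build each key's list of databases by one rescan per key.
--     all_keys = dict.fromkeys(
--         key
--         for db in bases
--         for key in fuente_de_datos_metadatos[db]['resolution'])
--     return {key: [db for db in bases
--                   if key in fuente_de_datos_metadatos[db]['resolution']]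
--             for key in all_keys}
-- ===== Notes on version B (the rewrite author's own statement) =====
-- stated objective: alternative
-- what changed: Replaces A's single pass that mutates an accumulating dict (insert-if-missing then append) by a two-phase computation: first an ordered dedup of all resolution keys, then a dict comprehension that rescans bases once per key.
import Mathlib
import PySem

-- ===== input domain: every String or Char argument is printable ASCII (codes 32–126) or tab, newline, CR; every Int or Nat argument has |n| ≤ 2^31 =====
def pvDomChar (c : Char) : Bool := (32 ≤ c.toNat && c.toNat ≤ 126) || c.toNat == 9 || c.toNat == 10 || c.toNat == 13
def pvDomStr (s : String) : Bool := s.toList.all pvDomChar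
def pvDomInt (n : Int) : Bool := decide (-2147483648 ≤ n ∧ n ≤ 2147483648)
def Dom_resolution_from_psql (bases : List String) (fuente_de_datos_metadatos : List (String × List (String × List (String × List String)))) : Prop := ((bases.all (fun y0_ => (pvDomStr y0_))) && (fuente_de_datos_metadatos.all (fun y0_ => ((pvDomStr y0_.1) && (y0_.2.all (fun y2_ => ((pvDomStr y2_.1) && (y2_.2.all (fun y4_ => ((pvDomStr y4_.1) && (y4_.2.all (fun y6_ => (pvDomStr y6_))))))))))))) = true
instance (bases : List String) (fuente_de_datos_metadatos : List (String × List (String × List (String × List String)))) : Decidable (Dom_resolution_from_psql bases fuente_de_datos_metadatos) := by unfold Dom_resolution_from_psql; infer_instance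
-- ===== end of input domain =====

-- B replaces A's single mutate-a-dict pass by a two-phase computation (ordered dedup of all
-- resolution keys, then one rescan of bases per key); objective: alternative decomposition.

-- ===== PORT A =====
-- fdm[db]['resolution'] raises KeyError when a lookup misses; the port uses getD [] there and
-- Pre_ excludes exactly those inputs.
def resolution_from_psql (bases : List String) (fuente_de_datos_metadatos : List (String × List (String × List (String × List String)))) : List (String × List String) :=
  (bases.foldl (fun (dic : PySem.Dict String (List String)) db =>
      let res_dict : PySem.Dict String (List String) :=
        PySem.Dict.ofList ((PySem.Dict.ofList ((PySem.Dict.ofList fuente_de_datos_metadatos).getD db [])).getD "resolution" [])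
      res_dict.keys.foldl (fun dic key =>
        let dic := if dic.contains key then dic else dic.insert key []
        dic.modify key [] (fun v => v ++ [db])) dic)
    PySem.Dict.empty).items

-- ===== PORT B =====
-- helper of B: the resolution dict of one database (getD [] where Python raises; see Pre_)
def pvResDict (fuente_de_datos_metadatos : List (String × List (String × List (String × List String)))) (db : String) : PySem.Dict String (List String) :=
  PySem.Dict.ofList ((PySem.Dict.ofList ((PySem.Dict.ofList fuente_de_datos_metadatos).getD db [])).getD "resolution" [])

def resolution_from_psql_alt (bases : List String) (fuente_de_datos_metadatos : List (String × List (String × List (String × List String)))) : List (String × List String) :=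
  let all_keys := PySem.List.dedup (bases.flatMap (fun db => (pvResDict fuente_de_datos_metadatos db).keys))
  all_keys.map (fun key => (key, bases.filter (fun db => (pvResDict fuente_de_datos_metadatos db).contains key)))

-- ===== PRECONDITION & SPEC =====
-- Pre_: every selected base has a metadata entry that itself has a 'resolution' entry;
-- elsewhere the Python A raises KeyError.
def Pre_resolution_from_psql (bases : List String) (fuente_de_datos_metadatos : List (String × List (String × List (String × List String)))) : Prop :=
  ∀ db ∈ bases, (PySem.Dict.ofList fuente_de_datos_metadatos).contains db = true ∧
    (PySem.Dict.ofList ((PySem.Dict.ofList fuente_de_datos_metadatos).getD db [])).contains "resolution" = true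
instance (bases : List String) (fuente_de_datos_metadatos : List (String × List (String × List (String × List String)))) : Decidable (Pre_resolution_from_psql bases fuente_de_datos_metadatos) := by unfold Pre_resolution_from_psql; infer_instance

def pvWitness_resolution_from_psql : List String × (List (String × List (String × List (String × List String)))) :=
  (["a"], [("a", [("resolution", [("r1", ["v"])])])])

def Spec_resolution_from_psql (bases : List String) (fuente_de_datos_metadatos : List (String × List (String × List (String × List String)))) (out : List (String × List String)) : Prop := out = resolution_from_psql_alt bases fuente_de_datos_metadatos
instance (bases : List String) (fuente_de_datos_metadatos : List (String × List (String × List (String × List String)))) (out : List (String × List String)) : Decidable (Spec_resolution_from_psql bases fuente_de_datos_metadatos out) := by unfold Spec_resolution_from_psql; infer_instance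

-- ===== CLAIM (what is proved, stated in full; the proofs are below) =====
def Claim_equal_resolution_from_psql : Prop := ∀ (bases : List String) (fuente_de_datos_metadatos : List (String × List (String × List (String × List String)))), Dom_resolution_from_psql bases fuente_de_datos_metadatos → Pre_resolution_from_psql bases fuente_de_datos_metadatos → Spec_resolution_from_psql bases fuente_de_datos_metadatos (resolution_from_psql bases fuente_de_datos_metadatos)

-- ===== LEMMAS AND PROOFS =====

-- A's loop with the two-step body (insert-if-missing, then in-place append) rewritten as one insert
def pvLoop (fuente_de_datos_metadatos : List (String × List (String × List (String × List String)))) (p : List String) : PySem.Dict String (List String) :=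
  p.foldl (fun d db =>
    (pvResDict fuente_de_datos_metadatos db).keys.foldl
      (fun dic key => dic.insert key (dic.getD key [] ++ [db])) d) PySem.Dict.empty

-- A's inner body is extensionally one insert
theorem pv_step_eq (d : PySem.Dict String (List String)) (key db : String) :
    (let dic := if d.contains key then d else d.insert key []
     dic.modify key [] (fun v => v ++ [db])) = d.insert key (d.getD key [] ++ [db]) := by
  split_ifs with h
  · rfl
  · have h' : d.contains key = false := by simpa using h
    show (d.insert key []).insert key ((d.insert key []).getD key [] ++ [db])
        = d.insert key (d.getD key [] ++ [db])
    rw [PySem.Dict.getD_insert_self, PySem.Dict.insert_insert_self,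
        PySem.Dict.getD_of_not_contains _ _ h']

theorem pv_A_eq_loop (bases : List String) (fuente_de_datos_metadatos : List (String × List (String × List (String × List String)))) :
    resolution_from_psql bases fuente_de_datos_metadatos = (pvLoop fuente_de_datos_metadatos bases).items := by
  unfold resolution_from_psql pvLoop pvResDict
  congr 1
  apply PySem.List.foldl_congr_mem
  intro d db _
  apply PySem.List.foldl_congr_mem
  intro dic key _
  exact pv_step_eq dic key db

-- value of one inner pass at any key
theorem pv_inner_getD (l : List String) (hl : l.Nodup) (db : String) :
    ∀ (d : PySem.Dict String (List String)) (k : String),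
    (l.foldl (fun dic key => dic.insert key (dic.getD key [] ++ [db])) d).getD k []
      = d.getD k [] ++ (if k ∈ l then [db] else []) := by
  induction l with
  | nil => intro d k; simp
  | cons key rest ih =>
    intro d k
    simp only [List.foldl_cons]
    rw [ih (List.Nodup.of_cons hl)]
    by_cases hk : k = key
    · subst hk
      have hnot : k ∉ rest := (List.nodup_cons.mp hl).1
      simp [hnot, PySem.Dict.getD_insert_self]
    · rw [PySem.Dict.getD_insert_of_ne _ _ _ hk]
      simp [hk]

-- keys produced by the outer loop, from any start
theorem pv_loop_keys_from (fdm : List (String × List (String × List (String × List String)))) (p : List String) :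
    ∀ (d : PySem.Dict String (List String)),
    (p.foldl (fun d db =>
        (pvResDict fdm db).keys.foldl (fun dic key => dic.insert key (dic.getD key [] ++ [db])) d) d).keys
      = PySem.Set.update d.keys (p.flatMap (fun db => (pvResDict fdm db).keys)) := by
  induction p with
  | nil => intro d; simp [PySem.Set.update]
  | cons db p ih =>
    intro d
    simp only [List.foldl_cons, List.flatMap_cons]
    rw [ih, PySem.Dict.keys_foldl_insert]
    simp [PySem.Set.update, List.foldl_append]

-- value of the outer loop at any key, from any start
theorem pv_loop_getD_from (fdm : List (String × List (String × List (String × List String)))) (p : List String) :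
    ∀ (d : PySem.Dict String (List String)) (k : String),
    (p.foldl (fun d db =>
        (pvResDict fdm db).keys.foldl (fun dic key => dic.insert key (dic.getD key [] ++ [db])) d) d).getD k []
      = d.getD k [] ++ p.filter (fun db => (pvResDict fdm db).contains k) := by
  induction p with
  | nil => intro d k; simp
  | cons db p ih =>
    intro d k
    simp only [List.foldl_cons, List.filter_cons]
    have hnd : (pvResDict fdm db).keys.Nodup := by
      unfold pvResDict; exact PySem.Dict.nodup_keys_ofList _
    rw [ih, pv_inner_getD _ hnd db d k]
    by_cases h : (pvResDict fdm db).contains k = true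
    · have hm : k ∈ (pvResDict fdm db).keys := (PySem.Dict.contains_iff_mem_keys _ _).mp h
      simp [h, hm]
    · have hm : k ∉ (pvResDict fdm db).keys := by
        intro hmem
        exact h ((PySem.Dict.contains_iff_mem_keys _ _).mpr hmem)
      simp [h, hm]

theorem pv_loop_keys (fdm : List (String × List (String × List (String × List String)))) (p : List String) :
    (pvLoop fdm p).keys = PySem.List.dedup (p.flatMap (fun db => (pvResDict fdm db).keys)) := by
  rw [pvLoop, pv_loop_keys_from]
  simp [PySem.Set.update, PySem.List.dedup_eq_ofList, PySem.Set.ofList_eq_foldl]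

-- ===== VERDICT (by name: the statement is the Claim_ definition above) =====
theorem resolution_from_psql_spec : Claim_equal_resolution_from_psql := by
  intro bases fdm _hDom _hPre
  show resolution_from_psql bases fdm = resolution_from_psql_alt bases fdm
  rw [pv_A_eq_loop]
  have hnd : (pvLoop fdm bases).keys.Nodup := by
    rw [pv_loop_keys]; exact PySem.List.nodup_dedup _
  rw [PySem.Dict.items_eq_map_keys _ hnd ([] : List String), pv_loop_keys]
  unfold resolution_from_psql_alt
  apply List.map_congr_left
  intro k _
  congr 1
  rw [pvLoop, pv_loop_getD_from]
  simp
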